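-- pv_equiv track=rewrite | github.com/jjsornwakii/OODS | ch6/ฮาน้อยๆหน่อยนะ.py | createTower
-- ===== SOURCE A (Python) =====
-- def createTower(n, l, empty):
--     if empty == 0:
--         if n > 0:
--             l.append(str(n))
--             return createTower(n-1, l, empty)
--         elif n == 0:
--             l.append('|')
--             return createTower(n-1, l, empty)
--         else:
--             return l
--     else:
--         if n >= 0:
--             l.append('|')
--             return createTower(n-1, l, empty)
--         else:
--             return l
-- ===== SOURCE B (Python) =====
-- def createTower(n, l, empty):
--     if empty == 0:
--         m = n
--         while m > 0:
--             l.append(str(m))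
--             m -= 1
--         if m == 0:
--             l.append('|')
--     else:
--         m = n
--         while m >= 0:
--             l.append('|')
--             m -= 1
--     return l
-- ===== Notes on version B (the rewrite author's own statement) =====
-- stated objective: simpler
-- what changed: Replaces the tail recursion that rebuilds the call for every step with a plain iterative while-loop that mutates l in place and returns it.
import Mathlib
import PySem

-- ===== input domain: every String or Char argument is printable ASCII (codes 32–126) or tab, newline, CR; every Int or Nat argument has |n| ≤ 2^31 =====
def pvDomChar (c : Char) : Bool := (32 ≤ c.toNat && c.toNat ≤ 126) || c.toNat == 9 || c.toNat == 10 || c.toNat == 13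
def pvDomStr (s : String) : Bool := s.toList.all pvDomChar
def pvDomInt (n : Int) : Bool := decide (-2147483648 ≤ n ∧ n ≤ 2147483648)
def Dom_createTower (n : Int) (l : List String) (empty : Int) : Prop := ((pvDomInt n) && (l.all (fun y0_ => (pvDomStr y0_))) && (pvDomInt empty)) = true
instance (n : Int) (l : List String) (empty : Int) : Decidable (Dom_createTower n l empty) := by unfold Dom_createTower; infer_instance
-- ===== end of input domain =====

-- B rewrites A's tail recursion as a plain iterative loop (objective: simpler).
-- Both A and B mutate the argument list l in place in Python; the equivalence proved here is about the return value.

-- ===== PORT A =====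
-- literal transliteration of A's tail recursion (list mutation modeled by passing the appended list)
def createTower (n : Int) (l : List String) (empty : Int) : List String :=
  if empty = 0 then
    if n > 0 then
      createTower (n - 1) (l ++ [PySem.Int.toStr n]) empty
    else if n = 0 then
      createTower (n - 1) (l ++ ["|"]) empty
    else
      l
  else
    if n ≥ 0 then
      createTower (n - 1) (l ++ ["|"]) empty
    else
      l
termination_by (n + 1).toNat
decreasing_by all_goals omega

-- ===== PORT B =====
-- B's first while-loop: while m > 0: l.append(str(m)); m -= 1   (returns the final l and m)
def pvWhileNum (m : Int) (l : List String) : List String × Int :=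
  if m > 0 then pvWhileNum (m - 1) (l ++ [PySem.Int.toStr m]) else (l, m)
termination_by m.toNat
decreasing_by omega

-- B's second while-loop: while m >= 0: l.append('|'); m -= 1
def pvWhileBar (m : Int) (l : List String) : List String × Int :=
  if m ≥ 0 then pvWhileBar (m - 1) (l ++ ["|"]) else (l, m)
termination_by (m + 1).toNat
decreasing_by omega

def createTower_alt (n : Int) (l : List String) (empty : Int) : List String :=
  if empty = 0 then
    let p := pvWhileNum n l
    if p.2 = 0 then p.1 ++ ["|"] else p.1
  else
    (pvWhileBar n l).1

-- ===== PRECONDITION & SPEC =====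
-- Pre_ excludes large n (n > 900): A recurses once per countdown step, so for n around and above
-- Python's recursion limit (~1000, environment-dependent) it raises RecursionError; the margin below
-- the exact limit also excludes some inputs A still returns on, since the precise threshold depends
-- on the interpreter's stack state.  B's loop returns normally there.
def Pre_createTower (n : Int) (_l : List String) (_empty : Int) : Prop := n ≤ 900
instance (n : Int) (l : List String) (empty : Int) : Decidable (Pre_createTower n l empty) := by unfold Pre_createTower; infer_instance
def pvWitness_createTower : Int × List String × Int := (3, ["x"], 0)

def Spec_createTower (n : Int) (l : List String) (empty : Int) (out : List String) : Prop := out = createTower_alt n l empty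
instance (n : Int) (l : List String) (empty : Int) (out : List String) : Decidable (Spec_createTower n l empty out) := by unfold Spec_createTower; infer_instance

-- ===== CLAIM (what is proved, stated in full; the proofs are below) =====
def Claim_equal_createTower : Prop := ∀ (n : Int) (l : List String) (empty : Int), Dom_createTower n l empty → Pre_createTower n l empty → Spec_createTower n l empty (createTower n l empty)

-- ===== LEMMAS AND PROOFS =====

lemma createTower_eq_alt_zero : ∀ (k : Nat) (n : Int) (l : List String), (n + 1).toNat ≤ k →
    createTower n l 0 = createTower_alt n l 0 := by
  intro k
  induction k with
  | zero =>
    intro n l hk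
    have hn : n < 0 := by omega
    rw [createTower.eq_def, createTower_alt]
    simp only [reduceIte]
    rw [pvWhileNum.eq_def]
    have h1 : ¬ n > 0 := by omega
    have h2 : ¬ n = 0 := by omega
    simp [h1, h2]
  | succ k ih =>
    intro n l hk
    by_cases hpos : n > 0
    · -- A steps; B's loop steps the same way
      rw [createTower.eq_def]
      simp only [reduceIte, if_pos hpos]
      rw [ih (n - 1) (l ++ [PySem.Int.toStr n]) (by omega)]
      unfold createTower_alt
      simp only [reduceIte]
      rw [pvWhileNum.eq_def (m := n)]
      simp [hpos]
    · by_cases hz : n = 0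
      · subst hz
        rw [createTower.eq_def]
        simp only [reduceIte]
        norm_num
        rw [createTower.eq_def]
        norm_num
        unfold createTower_alt
        simp only [reduceIte]
        rw [pvWhileNum.eq_def]
        norm_num
      · -- n < 0
        rw [createTower.eq_def, createTower_alt]
        simp only [reduceIte]
        rw [pvWhileNum.eq_def]
        simp [hpos, hz]

lemma createTower_eq_alt_nonzero : ∀ (k : Nat) (n : Int) (l : List String) (empty : Int), empty ≠ 0 →
    (n + 1).toNat ≤ k → createTower n l empty = createTower_alt n l empty := by
  intro k
  induction k with
  | zero =>
    intro n l empty he hk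
    have hn : ¬ n ≥ 0 := by omega
    rw [createTower.eq_def, createTower_alt]
    simp only [if_neg he]
    rw [pvWhileBar.eq_def]
    simp [hn]
  | succ k ih =>
    intro n l empty he hk
    by_cases hn : n ≥ 0
    · rw [createTower.eq_def]
      simp only [if_neg he, if_pos hn]
      rw [ih (n - 1) (l ++ ["|"]) empty he (by omega)]
      unfold createTower_alt
      simp only [if_neg he]
      rw [pvWhileBar.eq_def (m := n)]
      simp [hn]
    · rw [createTower.eq_def, createTower_alt]
      simp only [if_neg he]
      rw [pvWhileBar.eq_def]
      simp [hn]

-- ===== VERDICT (by name: the statement is the Claim_ definition above) =====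
theorem createTower_spec : Claim_equal_createTower := by
  intro n l empty _ _
  unfold Spec_createTower
  by_cases he : empty = 0
  · subst he
    exact createTower_eq_alt_zero (n + 1).toNat n l le_rfl
  · exact createTower_eq_alt_nonzero (n + 1).toNat n l empty he le_rfl
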